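-- pv_equiv track=rewrite | github.com/leonardomaier/thg-api | app/utils.py | extract_population_by_year
-- ===== SOURCE A (Python) =====
-- def extract_population_by_year(data):
--     state_populations = {}
--     for entry in data:
--         year = entry["Year"]
--         population = entry["Population"]
--         state = entry["Geography"]
--
--         if state not in state_populations:
--             state_populations[state] = []
--
--         state_populations[state].append((year, population))
--
--     for state, populations in state_populations.items():
--         state_populations[state] = sorted(populations)
--
--     return state_populations
-- ===== SOURCE B (Python) =====
-- def extract_population_by_year(data):
--     # Register each state once, in first-occurrence order.
--     result = {}
--     for entry in data:
--         result.setdefault(entry["Geography"], [])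
--     # One global stable sort by (year, population); a single pass then fills
--     # every state's list already in sorted order (no per-group sort).
--     for entry in sorted(data, key=lambda e: (e["Year"], e["Population"])):
--         result[entry["Geography"]].append((entry["Year"], entry["Population"]))
--     return result
-- ===== Notes on version B (the rewrite author's own statement) =====
-- stated objective: alternative
-- what changed: Instead of grouping entries per state and then sorting each group, B registers the states once in first-occurrence order and makes a single pass over the data sorted globally by (year, population), so each state's list is filled already sorted with no per-group sort.
import Mathlib
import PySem

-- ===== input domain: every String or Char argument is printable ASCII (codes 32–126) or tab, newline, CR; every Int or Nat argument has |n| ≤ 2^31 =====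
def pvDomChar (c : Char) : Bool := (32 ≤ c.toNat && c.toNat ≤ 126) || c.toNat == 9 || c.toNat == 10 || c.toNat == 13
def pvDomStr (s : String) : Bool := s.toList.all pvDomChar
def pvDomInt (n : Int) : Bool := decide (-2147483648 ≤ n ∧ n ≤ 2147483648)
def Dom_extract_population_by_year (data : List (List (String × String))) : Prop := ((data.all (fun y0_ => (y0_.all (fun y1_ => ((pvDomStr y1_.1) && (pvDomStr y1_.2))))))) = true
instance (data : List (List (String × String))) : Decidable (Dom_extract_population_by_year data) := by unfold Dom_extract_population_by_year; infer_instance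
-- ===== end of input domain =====

-- B replaces A's group-then-sort-each-group with one global stable sort by (year, population)
-- followed by a single grouping pass; same return value, no speed claim.

-- entry[k]: Python raises KeyError when k is absent; Pre_ excludes that case, so the "" default is never used.
def pvEntryGet (e : List (String × String)) (k : String) : String :=
  (PySem.Dict.get? ⟨e⟩ k).getD ""

-- ===== PORT A =====
def extract_population_by_year (data : List (List (String × String))) : List (String × List (String × String)) :=
  let state_populations : PySem.Dict String (List (String × String)) :=
    data.foldl (fun state_populations entry =>
      let year := pvEntryGet entry "Year"
      let population := pvEntryGet entry "Population"
      let state := pvEntryGet entry "Geography"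
      let state_populations :=
        if state_populations.contains state then state_populations
        else state_populations.insert state []
      state_populations.modify state [] (fun l => l ++ [(year, population)]))
      PySem.Dict.empty
  let state_populations :=
    state_populations.items.foldl (fun sp p =>
      sp.insert p.1 (PySem.List.sorted p.2 (fun q => (toLex q : Lex (String × String)))))
      state_populations
  state_populations.items

-- ===== PORT B =====
def extract_population_by_year_alt (data : List (List (String × String))) : List (String × List (String × String)) :=
  let result : PySem.Dict String (List (String × String)) :=
    data.foldl (fun result entry => result.setdefault (pvEntryGet entry "Geography") [])
      PySem.Dict.empty
  let srt := PySem.List.sorted data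
    (fun e => (toLex (pvEntryGet e "Year", pvEntryGet e "Population") : Lex (String × String)))
  let result :=
    srt.foldl (fun result entry =>
      result.modify (pvEntryGet entry "Geography") []
        (fun l => l ++ [(pvEntryGet entry "Year", pvEntryGet entry "Population")]))
      result
  result.items

-- ===== PRECONDITION & SPEC =====
-- Pre_: every entry carries the keys "Year", "Population" and "Geography"; on any other entry the Python A raises KeyError.
def Pre_extract_population_by_year (data : List (List (String × String))) : Prop :=
  (data.all (fun e => (PySem.Dict.mk e).contains "Year" && (PySem.Dict.mk e).contains "Population" && (PySem.Dict.mk e).contains "Geography")) = true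
instance (data : List (List (String × String))) : Decidable (Pre_extract_population_by_year data) := by unfold Pre_extract_population_by_year; infer_instance

def pvWitness_extract_population_by_year : (List (List (String × String))) :=
  [[("Year", "1999"), ("Population", "12"), ("Geography", "Alabama")],
   [("Year", "1998"), ("Population", "7"), ("Geography", "Alabama")]]

def Spec_extract_population_by_year (data : List (List (String × String))) (out : List (String × List (String × String))) : Prop := out = extract_population_by_year_alt data
instance (data : List (List (String × String))) (out : List (String × List (String × String))) : Decidable (Spec_extract_population_by_year data out) := by unfold Spec_extract_population_by_year; infer_instance

-- ===== CLAIM (what is proved, stated in full; the proofs are below) =====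
def Claim_equal_extract_population_by_year : Prop := ∀ (data : List (List (String × String))), Dom_extract_population_by_year data → Pre_extract_population_by_year data → Spec_extract_population_by_year data (extract_population_by_year data)

-- ===== LEMMAS AND PROOFS =====

-- proof-side abbreviations for the three field accesses and the sort key
def pvGeo (e : List (String × String)) : String := pvEntryGet e "Geography"
def pvPair (e : List (String × String)) : String × String :=
  (pvEntryGet e "Year", pvEntryGet e "Population")
def pvKey (q : String × String) : Lex (String × String) := toLex q

-- A's loop body (ensure key, then append) is one Dict.modify
lemma stepA_eq_modify (d : PySem.Dict String (List (String × String))) (s : String)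
    (yp : String × String) :
    ((if d.contains s then d else d.insert s []).modify s [] (fun l => l ++ [yp]))
      = d.modify s [] (fun l => l ++ [yp]) := by
  by_cases h : d.contains s
  · simp [h]
  · simp only [Bool.not_eq_true] at h
    simp [h, PySem.Dict.modify, PySem.Dict.getD_insert_self, PySem.Dict.insert_insert_self,
      PySem.Dict.getD_of_not_contains d _ h]

lemma getD_entry_fold {E ν : Type} (data : List E) (k : E → String) (v : E → ν)
    (d : PySem.Dict String (List ν)) (c : String) :
    (data.foldl (fun d e => d.modify (k e) [] (fun l => l ++ [v e])) d).getD c []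
      = d.getD c [] ++ (data.filter (fun e => k e == c)).map v := by
  have h := PySem.Dict.getD_foldl_modify_append (data.map (fun e => (k e, v e))) d c
  simpa [List.foldl_map, List.filter_map, List.map_map, Function.comp] using h

lemma keys_entry_fold {E ν : Type} (data : List E) (k : E → String) (v : E → ν)
    (d : PySem.Dict String (List ν)) :
    (data.foldl (fun d e => d.modify (k e) [] (fun l => l ++ [v e])) d).keys
      = PySem.Set.update d.keys (data.map k) := by
  have h := PySem.Dict.keys_foldl_insert_key data k (fun d e => d.getD (k e) [] ++ [v e]) d
  simpa [PySem.Dict.modify] using h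

lemma keys_setdefault {ν : Type} (d : PySem.Dict String ν) (k : String) (v : ν) :
    (d.setdefault k v).keys = PySem.Set.add d.keys k := by
  by_cases h : d.contains k
  · simp only [PySem.Dict.setdefault, h, if_pos]
    rw [PySem.Set.add_of_mem ((PySem.Dict.contains_iff_mem_keys d k).mp h)]
  · simp only [Bool.not_eq_true] at h
    simp only [PySem.Dict.setdefault, h, Bool.false_eq_true, if_neg, not_false_iff]
    rw [PySem.Set.add_of_not_mem (fun hm => by
      simp [(PySem.Dict.contains_iff_mem_keys d k).mpr hm] at h)]
    simp [PySem.Dict.keys]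

lemma keys_setdefault_fold {E ν : Type} (data : List E) (k : E → String)
    (d : PySem.Dict String (List ν)) :
    (data.foldl (fun d e => d.setdefault (k e) []) d).keys
      = PySem.Set.update d.keys (data.map k) := by
  induction data generalizing d with
  | nil => simp [PySem.Set.update_nil]
  | cons e tl ih =>
      simp only [List.foldl_cons, List.map_cons, PySem.Set.update_cons, ih, keys_setdefault]

lemma getD_setdefault_nil {ν : Type} (d : PySem.Dict String (List ν)) (k c : String) :
    (d.setdefault k ([] : List ν)).getD c [] = d.getD c [] := by
  by_cases hck : c = k
  · subst hck
    exact PySem.Dict.getD_setdefault_self d c [] []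
  · rw [PySem.Dict.getD_eq_get?_getD, PySem.Dict.get?_setdefault_of_ne d _ hck,
      ← PySem.Dict.getD_eq_get?_getD]

lemma getD_setdefault_fold {E ν : Type} (data : List E) (k : E → String)
    (d : PySem.Dict String (List ν)) (c : String) :
    (data.foldl (fun d e => d.setdefault (k e) []) d).getD c [] = d.getD c [] := by
  induction data generalizing d with
  | nil => rfl
  | cons e tl ih => rw [List.foldl_cons, ih, getD_setdefault_nil]

lemma getD_foldl_insert_not_mem {ν : Type} (l : List (String × ν)) (g : String × ν → ν)
    (d : PySem.Dict String ν) (c : String) (dflt : ν) (h : c ∉ l.map Prod.fst) :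
    (l.foldl (fun acc p => acc.insert p.1 (g p)) d).getD c dflt = d.getD c dflt := by
  induction l generalizing d with
  | nil => rfl
  | cons p tl ih =>
      simp only [List.map_cons, List.mem_cons, not_or] at h
      rw [List.foldl_cons, ih _ h.2, PySem.Dict.getD_insert_of_ne _ _ _ h.1]

lemma getD_foldl_insert_map {ν : Type} (K : List String) (w : String → ν) (g : String × ν → ν)
    (d : PySem.Dict String ν) (s : String) (dflt : ν) (hnd : K.Nodup) (hs : s ∈ K) :
    ((K.map (fun t => (t, w t))).foldl (fun acc p => acc.insert p.1 (g p)) d).getD s dflt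
      = g (s, w s) := by
  induction K generalizing d with
  | nil => cases hs
  | cons t tl ih =>
      simp only [List.map_cons, List.foldl_cons]
      rcases List.mem_cons.mp hs with h | h
      · subst h
        rw [getD_foldl_insert_not_mem _ _ _ _ _ (by
            simpa [List.map_map, Function.comp] using (List.nodup_cons.mp hnd).1),
          PySem.Dict.getD_insert_self]
      · exact ih _ (List.nodup_cons.mp hnd).2 h

lemma update_eq_self_of_subset (s : PySem.Set String) (l : List String)
    (h : ∀ x ∈ l, x ∈ s) : s.update l = s := by
  rw [PySem.Set.update_eq_append_filter]
  have hf : List.filter (fun y => !s.contains y) (PySem.Set.ofList l) = [] := by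
    rw [List.filter_eq_nil_iff]
    intro y hy
    have hm : y ∈ l := (PySem.Set.mem_ofList l y).mp hy
    simp
    exact h y hm
  rw [hf, List.append_nil]

-- the heart: one global stable sort by (year, population) yields every group already sorted
lemma group_sorted {E : Type} (data : List E) (k : E → String) (v : E → String × String)
    (s : String) :
    PySem.List.sorted ((data.filter (fun e => k e == s)).map v)
        (fun q => (toLex q : Lex (String × String)))
      = ((PySem.List.sorted data (fun e => (toLex (v e) : Lex (String × String)))).filter
          (fun e => k e == s)).map v := by
  have hperm : ((data.filter (fun e => k e == s)).map v).Perm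
      (((PySem.List.sorted data (fun e => (toLex (v e) : Lex (String × String)))).filter
        (fun e => k e == s)).map v) :=
    (((PySem.List.sorted_perm data _ false).filter _).map v).symm
  have hpw : List.Pairwise
      (fun a b => (toLex a : Lex (String × String)) ≤ toLex b)
      (((PySem.List.sorted data (fun e => (toLex (v e) : Lex (String × String)))).filter
        (fun e => k e == s)).map v) := by
    rw [List.pairwise_map]
    exact (PySem.List.sorted_pairwise data _).filter _
  calc PySem.List.sorted ((data.filter (fun e => k e == s)).map v)
        (fun q => (toLex q : Lex (String × String)))
      = PySem.List.sorted
          (((PySem.List.sorted data (fun e => (toLex (v e) : Lex (String × String)))).filter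
            (fun e => k e == s)).map v)
          (fun q => (toLex q : Lex (String × String))) :=
        PySem.List.sorted_eq_sorted_of_perm _ _ _ toLex.injective hperm
    _ = _ := PySem.List.sorted_eq_self_of_pairwise _ _ hpw

lemma portA_items (data : List (List (String × String))) :
    extract_population_by_year data
      = (PySem.Set.update ([] : PySem.Set String) (data.map pvGeo)).map
          (fun s => (s, PySem.List.sorted ((data.filter (fun e => pvGeo e == s)).map pvPair)
            (fun q => (toLex q : Lex (String × String))))) := by
  simp only [extract_population_by_year, stepA_eq_modify, pvGeo]
  set K := PySem.Set.update ([] : PySem.Set String)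
    (data.map (fun e => pvEntryGet e "Geography")) with hK
  have hKnodup : K.Nodup := PySem.Set.nodup_update _ _ List.nodup_nil
  set dA := data.foldl (fun d e => d.modify (pvEntryGet e "Geography") []
      (fun l => l ++ [(pvEntryGet e "Year", pvEntryGet e "Population")]))
    PySem.Dict.empty with hdA
  have hdAkeys : dA.keys = K := by
    rw [hdA, keys_entry_fold, PySem.Dict.keys_empty]
  have hdAget : ∀ c, dA.getD c []
      = (data.filter (fun e => pvEntryGet e "Geography" == c)).map
          (fun e => (pvEntryGet e "Year", pvEntryGet e "Population")) := by
    intro c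
    rw [hdA, getD_entry_fold, PySem.Dict.getD_empty, List.nil_append]
  have hitems : dA.items = K.map (fun t => (t, dA.getD t [])) := by
    rw [PySem.Dict.items_eq_map_keys dA (by rw [hdAkeys]; exact hKnodup) [], hdAkeys]
  have hfk : (dA.items.foldl (fun sp p =>
      sp.insert p.1 (PySem.List.sorted p.2 (fun q => (toLex q : Lex (String × String))))) dA).keys
      = K := by
    rw [PySem.Dict.keys_foldl_insert_key dA.items Prod.fst
      (fun _ p => PySem.List.sorted p.2 (fun q => (toLex q : Lex (String × String)))) dA]
    have : dA.items.map Prod.fst = dA.keys := rfl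
    rw [this, hdAkeys]
    exact update_eq_self_of_subset _ _ (fun x hx => hx)
  rw [PySem.Dict.items_eq_map_keys _ (by rw [hfk]; exact hKnodup) [], hfk]
  apply List.map_congr_left
  intro s hs
  refine congrArg (Prod.mk s) ?_
  conv_lhs => rw [hitems]
  rw [getD_foldl_insert_map K (fun t => dA.getD t [])
    (fun p => PySem.List.sorted p.2 (fun q => (toLex q : Lex (String × String)))) dA s []
    hKnodup hs]
  rw [hdAget s]
  rfl

lemma portB_items (data : List (List (String × String))) :
    extract_population_by_year_alt data
      = (PySem.Set.update ([] : PySem.Set String) (data.map pvGeo)).map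
          (fun s => (s, ((PySem.List.sorted data
              (fun e => (toLex (pvPair e) : Lex (String × String)))).filter
            (fun e => pvGeo e == s)).map pvPair)) := by
  simp only [extract_population_by_year_alt, pvGeo, pvPair]
  set K := PySem.Set.update ([] : PySem.Set String)
    (data.map (fun e => pvEntryGet e "Geography")) with hK
  have hKnodup : K.Nodup := PySem.Set.nodup_update _ _ List.nodup_nil
  set d0 := data.foldl
    (fun r e => r.setdefault (pvEntryGet e "Geography") ([] : List (String × String)))
    PySem.Dict.empty with hd0
  set srt := PySem.List.sorted data
    (fun e => (toLex (pvEntryGet e "Year", pvEntryGet e "Population") : Lex (String × String)))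
    with hsrt
  have hd0keys : d0.keys = K := by
    rw [hd0, keys_setdefault_fold, PySem.Dict.keys_empty]
  have hkeys : (srt.foldl (fun r e => r.modify (pvEntryGet e "Geography") []
      (fun l => l ++ [(pvEntryGet e "Year", pvEntryGet e "Population")])) d0).keys
      = K := by
    rw [keys_entry_fold, hd0keys]
    apply update_eq_self_of_subset
    intro x hx
    rcases List.mem_map.mp hx with ⟨e, he, rfl⟩
    have hed : e ∈ data := (PySem.List.sorted_perm data _ false).mem_iff.mp (hsrt ▸ he)
    rw [hK, PySem.Set.mem_update]
    exact Or.inr (List.mem_map_of_mem hed)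
  rw [PySem.Dict.items_eq_map_keys _ (by rw [hkeys]; exact hKnodup) [], hkeys]
  apply List.map_congr_left
  intro s hs
  refine congrArg (Prod.mk s) ?_
  rw [getD_entry_fold, hd0, getD_setdefault_fold, PySem.Dict.getD_empty, List.nil_append]
  rfl

lemma extract_eq (data : List (List (String × String))) :
    extract_population_by_year data = extract_population_by_year_alt data := by
  rw [portA_items, portB_items]
  apply List.map_congr_left
  intro s _
  exact congrArg (Prod.mk s) (group_sorted data pvGeo pvPair s)

-- ===== VERDICT (by name: the statement is the Claim_ definition above) =====
theorem extract_population_by_year_spec : Claim_equal_extract_population_by_year := by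
  intro data _ _
  exact extract_eq data
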